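-- pv_equiv track=rewrite | github.com/boldirev-as/optim_guidance_scheduling_diffusion | ImageReFL/src/utils/prompt_decomposition.py | _find_scene_split
-- ===== SOURCE A (Python) =====
-- _SCENE_PREPOSITIONS = (
--     " on ",
--     " in ",
--     " at ",
--     " under ",
--     " over ",
--     " against ",
--     " near ",
--     " by ",
--     " beside ",
--     " next to ",
--     " inside ",
--     " outside ",
--     " behind ",
--     " around ",
--     " amid ",
--     " among ",
-- )
--
-- def _find_scene_split(clause: str) -> int | None:
--     lowered = f" {clause.lower()} "
--     split_idx = None
--     for prep in _SCENE_PREPOSITIONS: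
--         idx = lowered.find(prep)
--         if idx == -1:
--             continue
--         raw_idx = max(0, idx - 1)
--         if split_idx is None or raw_idx < split_idx:
--             split_idx = raw_idx
--     return split_idx
-- ===== SOURCE B (Python) =====
-- _SCENE_PREPOSITIONS = (
--     " on ",
--     " in ",
--     " at ",
--     " under ",
--     " over ",
--     " against ",
--     " near ",
--     " by ",
--     " beside ",
--     " next to ",
--     " inside ",
--     " outside ",
--     " behind ",
--     " around ",
--     " amid ",
--     " among ",
-- )
--
-- def _find_scene_split(clause: str) -> int | None:
--     lowered = f" {clause.lower()} "
--     for i in range(len(lowered)):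
--         if any(lowered.startswith(prep, i) for prep in _SCENE_PREPOSITIONS):
--             return max(0, i - 1)
--     return None
-- ===== Notes on version B (the rewrite author's own statement) =====
-- stated objective: idiomatic
-- what changed: Replaced 16 independent full find scans plus a running minimum by a single left-to-right position scan that returns max(0, i-1) at the first position where any preposition matches.
import Mathlib
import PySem

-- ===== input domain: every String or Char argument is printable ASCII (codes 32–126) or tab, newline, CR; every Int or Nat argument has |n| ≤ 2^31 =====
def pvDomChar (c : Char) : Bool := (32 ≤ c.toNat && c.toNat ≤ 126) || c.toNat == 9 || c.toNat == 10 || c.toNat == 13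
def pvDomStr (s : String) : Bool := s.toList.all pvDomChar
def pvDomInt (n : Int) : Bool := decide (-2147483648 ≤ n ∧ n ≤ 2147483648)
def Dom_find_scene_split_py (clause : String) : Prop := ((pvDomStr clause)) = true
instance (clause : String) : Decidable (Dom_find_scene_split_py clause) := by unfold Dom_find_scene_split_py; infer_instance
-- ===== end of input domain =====

-- B replaces A's 16 independent full `find` scans plus a running minimum by one
-- left-to-right position scan that returns at the first matching position (idiomatic; same worst-case cost).

-- ===== PORT A =====
-- module constant _SCENE_PREPOSITIONS (as lists of chars, in source order)
def pvPreps : List (List Char) :=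
  [" on ".toList, " in ".toList, " at ".toList, " under ".toList, " over ".toList,
   " against ".toList, " near ".toList, " by ".toList, " beside ".toList,
   " next to ".toList, " inside ".toList, " outside ".toList, " behind ".toList,
   " around ".toList, " amid ".toList, " among ".toList]

-- the body of A's `for prep in _SCENE_PREPOSITIONS` loop
def pvStepA (lowered : List Char) (split_idx : Option Int) (prep : List Char) : Option Int :=
  let idx := PySem.Chars.find lowered prep
  if idx = -1 then split_idx          -- continue
  else
    let raw_idx := max 0 (idx - 1)
    match split_idx with              -- if split_idx is None or raw_idx < split_idx
    | none => some raw_idx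
    | some s => if raw_idx < s then some raw_idx else split_idx

def find_scene_split_py (clause : String) : Option Int :=
  -- lowered = f" {clause.lower()} "
  let lowered : List Char := ' ' :: PySem.Chars.lower clause.toList ++ [' ']
  pvPreps.foldl (pvStepA lowered) none

-- ===== PORT B =====
-- the `for i in range(len(lowered))` scan with early return; Python's lowered.startswith(prep, i)
-- is exactly Chars.startswith (lowered.drop i) prep for 0 ≤ i ≤ len(lowered).
def pvScan (lowered : List Char) (j : Nat) : Option Int :=
  if h : j < lowered.length then
    if pvPreps.any (fun p => PySem.Chars.startswith (lowered.drop j) p) then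
      some (max 0 ((j : Int) - 1))
    else pvScan lowered (j + 1)
  else none
termination_by lowered.length - j

def find_scene_split_py_alt (clause : String) : Option Int :=
  let lowered : List Char := ' ' :: PySem.Chars.lower clause.toList ++ [' ']
  pvScan lowered 0

-- ===== PRECONDITION & SPEC =====
def Spec_find_scene_split_py (clause : String) (out : Option Int) : Prop := out = find_scene_split_py_alt clause
instance (clause : String) (out : Option Int) : Decidable (Spec_find_scene_split_py clause out) := by unfold Spec_find_scene_split_py; infer_instance

-- ===== CLAIM (what is proved, stated in full; the proofs are below) =====
def Claim_equal_find_scene_split_py : Prop := ∀ (clause : String), Dom_find_scene_split_py clause → Spec_find_scene_split_py clause (find_scene_split_py clause)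

-- ===== LEMMAS AND PROOFS =====

-- "some preposition matches at position j of L"
def pvMatchAt (L : List Char) (j : Nat) : Prop := ∃ p ∈ pvPreps, p <+: L.drop j

lemma pvPreps_ne_nil : ∀ p ∈ pvPreps, p ≠ [] := by decide

-- the Bool test in pvScan decides pvMatchAt
lemma pv_any_iff (L : List Char) (j : Nat) :
    (pvPreps.any (fun p => PySem.Chars.startswith (L.drop j) p) = true) ↔ pvMatchAt L j := by
  simp [List.any_eq_true, PySem.Chars.startswith_iff, pvMatchAt]

-- a match position is < L.length (prepositions are nonempty)
lemma pv_match_lt (L : List Char) (j : Nat) (h : pvMatchAt L j) : j < L.length := by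
  obtain ⟨p, hp, hpre⟩ := h
  by_contra hge
  rw [List.drop_eq_nil_of_le (by omega)] at hpre
  exact pvPreps_ne_nil p hp (List.prefix_nil.mp hpre)

-- find L p, when it succeeds, is a match position and a lower bound of match positions of p
lemma pv_find_le_of_prefix (L p : List Char) (j : Nat) (h : p <+: L.drop j) :
    0 ≤ PySem.Chars.find L p ∧ (PySem.Chars.find L p).toNat ≤ j := by
  have hnn : 0 ≤ PySem.Chars.find L p := by
    rw [PySem.Chars.find_nonneg_iff]
    exact h.isInfix.trans (L.drop_suffix j).isInfix
  refine ⟨hnn, ?_⟩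
  by_contra hgt
  exact ((PySem.Chars.find_spec hnn).2 j (by omega)) h

-- scan: no match from j on → none
lemma pv_scan_none (L : List Char) (j : Nat)
    (h : ∀ k, j ≤ k → ¬ pvMatchAt L k) : pvScan L j = none := by
  unfold pvScan
  split
  · rw [if_neg]
    · exact pv_scan_none L (j + 1) (fun k hk => h k (by omega))
    · intro hb
      exact h j le_rfl ((pv_any_iff L j).mp hb)
  · rfl
termination_by L.length - j

-- scan: m is the first match position at or after j → some (max 0 (m-1))
lemma pv_scan_some (L : List Char) (j m : Nat) (hjm : j ≤ m)
    (hmatch : pvMatchAt L m) (hmin : ∀ k, j ≤ k → k < m → ¬ pvMatchAt L k) :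
    pvScan L j = some (max 0 ((m : Int) - 1)) := by
  unfold pvScan
  rcases eq_or_lt_of_le hjm with rfl | hlt
  · rw [dif_pos (pv_match_lt _ _ hmatch), if_pos ((pv_any_iff _ _).mpr hmatch)]
  · rw [dif_pos (by have := pv_match_lt L m hmatch; omega), if_neg]
    · exact pv_scan_some L (j + 1) m (by omega) hmatch (fun k hk hk' => hmin k (by omega) hk')
    · intro hb
      exact hmin j le_rfl hlt ((pv_any_iff L j).mp hb)
termination_by m - j

-- A's fold stays none when no preposition occurs
lemma pv_fold_none (L : List Char) (P : List (List Char))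
    (h : ∀ p ∈ P, PySem.Chars.find L p = -1) :
    P.foldl (pvStepA L) none = none := by
  induction P with
  | nil => rfl
  | cons p P ih =>
      simp only [List.foldl_cons, pvStepA, h p (by simp), if_pos]
      exact ih (fun q hq => h q (by simp [hq]))

-- A's fold computes some (max 0 (m-1)) when (m : Int) is the minimum of the successful finds
lemma pv_fold_min (L : List Char) (m : Nat) :
    ∀ (P : List (List Char)) (acc : Option Int),
    (∀ p ∈ P, PySem.Chars.find L p = -1 ∨ (m : Int) ≤ PySem.Chars.find L p) →
    ((∃ p ∈ P, PySem.Chars.find L p = (m : Int)) ∨ acc = some (max 0 ((m : Int) - 1))) →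
    (acc = none ∨ ∃ a, acc = some a ∧ max 0 ((m : Int) - 1) ≤ a) →
    P.foldl (pvStepA L) acc = some (max 0 ((m : Int) - 1)) := by
  intro P
  induction P with
  | nil =>
      intro acc _ hatt _
      rcases hatt with ⟨p, hp, _⟩ | rfl
      · exact absurd hp (by simp)
      · rfl
  | cons p P ih =>
      intro acc hlb hatt hacc
      simp only [List.foldl_cons]
      by_cases hfp : PySem.Chars.find L p = -1
      · rw [show pvStepA L acc p = acc by simp [pvStepA, hfp]]
        apply ih _ (fun q hq => hlb q (by simp [hq])) ?_ hacc
        rcases hatt with ⟨q, hq, hqe⟩ | rfl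
        · rcases List.mem_cons.mp hq with rfl | hq'
          · exfalso; rw [hfp] at hqe; omega
          · exact Or.inl ⟨q, hq', hqe⟩
        · exact Or.inr rfl
      · have hmle : (m : Int) ≤ PySem.Chars.find L p := by
          rcases hlb p (by simp) with h | h
          · exact absurd h hfp
          · exact h
        have hraw : max 0 ((m : Int) - 1) ≤ max 0 (PySem.Chars.find L p - 1) := by omega
        have hlb' : ∀ q ∈ P, PySem.Chars.find L q = -1 ∨ (m : Int) ≤ PySem.Chars.find L q :=
          fun q hq => hlb q (by simp [hq])
        by_cases hpe : PySem.Chars.find L p = (m : Int)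
        · -- head prep attains the minimum: the new accumulator is some (max 0 (m-1))
          have hstep : pvStepA L acc p = some (max 0 ((m : Int) - 1)) := by
            simp only [pvStepA, hpe]
            rw [if_neg (by omega : ¬ ((m : Int) = -1))]
            rcases hacc with rfl | ⟨a, rfl, ha⟩
            · rfl
            · by_cases hlt : max 0 ((m : Int) - 1) < a
              · simp [hlt]
              · have : a = max 0 ((m : Int) - 1) := by omega
                simp [this]
          rw [hstep]
          exact ih _ hlb' (Or.inr rfl) (Or.inr ⟨_, rfl, le_rfl⟩)
        · -- head prep does not attain the minimum
          rcases hatt with ⟨q, hq, hqe⟩ | hae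
          · rcases List.mem_cons.mp hq with rfl | hq'
            · exact absurd hqe hpe
            · -- attainment lives in the tail; new accumulator keeps the ≥ invariant
              have hacc' : ∃ a, pvStepA L acc p = some a ∧ max 0 ((m : Int) - 1) ≤ a := by
                rcases hacc with rfl | ⟨a, rfl, ha⟩
                · exact ⟨_, by simp [pvStepA, hfp], hraw⟩
                · by_cases hlt : max 0 (PySem.Chars.find L p - 1) < a
                  · exact ⟨_, by simp [pvStepA, hfp, hlt], hraw⟩
                  · exact ⟨a, by simp [pvStepA, hfp, hlt], ha⟩
              exact ih _ hlb' (Or.inl ⟨q, hq', hqe⟩) (Or.inr hacc')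
          · -- the accumulator already holds the minimum; raw ≥ it, so it is kept
            have hstep : pvStepA L acc p = acc := by
              rw [hae]
              simp only [pvStepA, if_neg hfp]
              rw [if_neg (by omega)]
            rw [hstep]
            exact ih _ hlb' (Or.inr hae) hacc

-- an infix occurs as a prefix of some drop
lemma pv_infix_drop (L p : List Char) (h : p <:+: L) : ∃ j, p <+: L.drop j := by
  rw [← PySem.Chars.isIn_iff_infix] at h
  exact (PySem.Chars.exists_prefix_drop_iff_isIn p L).mpr h

-- the common core: fold = scan for every padded list
lemma pv_core (L : List Char) :
    pvPreps.foldl (pvStepA L) none = pvScan L 0 := by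
  by_cases hex : ∃ j, pvMatchAt L j
  · haveI : DecidablePred (pvMatchAt L) := fun j => by unfold pvMatchAt; infer_instance
    set m := Nat.find hex with hm
    have hmatch : pvMatchAt L m := Nat.find_spec hex
    have hmin : ∀ k < m, ¬ pvMatchAt L k := fun k hk => Nat.find_min hex hk
    rw [pv_scan_some L 0 m (Nat.zero_le m) hmatch (fun k _ hk => hmin k hk)]
    -- p attaining the minimum
    obtain ⟨p0, hp0, hpre0⟩ := hmatch
    obtain ⟨hnn0, hle0⟩ := pv_find_le_of_prefix L p0 m hpre0
    have hfind0 : PySem.Chars.find L p0 = (m : Int) := by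
      have hmatchf : pvMatchAt L (PySem.Chars.find L p0).toNat :=
        ⟨p0, hp0, (PySem.Chars.find_spec hnn0).1⟩
      have : m ≤ (PySem.Chars.find L p0).toNat := Nat.find_min' hex hmatchf
      omega
    apply pv_fold_min L m pvPreps none ?_ (Or.inl ⟨p0, hp0, hfind0⟩) (Or.inl rfl)
    intro p hp
    by_cases hfp : PySem.Chars.find L p = -1
    · exact Or.inl hfp
    · have hnn : 0 ≤ PySem.Chars.find L p := by
        have := PySem.Chars.neg_one_le_find (s := L) (sub := p)
        omega
      have hmatchf : pvMatchAt L (PySem.Chars.find L p).toNat :=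
        ⟨p, hp, (PySem.Chars.find_spec hnn).1⟩
      have := Nat.find_min' hex hmatchf
      right; omega
  · push Not at hex
    rw [pv_scan_none L 0 (fun k _ => hex k), pv_fold_none]
    intro p hp
    by_contra hne
    have hinf : p <:+: L := by
      rw [← PySem.Chars.find_ne_neg_one_iff]; exact hne
    obtain ⟨j, hj⟩ := pv_infix_drop L p hinf
    exact hex j ⟨p, hp, hj⟩

-- ===== VERDICT (by name: the statement is the Claim_ definition above) =====
theorem find_scene_split_py_spec : Claim_equal_find_scene_split_py := by
  intro clause _
  unfold Spec_find_scene_split_py find_scene_split_py find_scene_split_py_alt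
  exact pv_core _
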